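-- pv_equiv track=rewrite | github.com/ut-issl/c2a-core | Script/CI/check_coding_rule.py | has_ended_with_list_before_target_
-- ===== SOURCE A (Python) =====
-- def has_ended_with_list_before_target_(line: str, target: str, ends: list) -> bool:
--     pos = 0
--     find_end = len(line)
--     # target_len = len(target)
--     while 1:
--         pos = line.rfind(target, 0, find_end)
--         if pos == -1:  # そもそも存在しない
--             return True
--         if pos == 0:  # 行頭
--             return True
--         if is_in_string_context_(line, pos):
--             pass
--         elif is_in_comment_context_in_line_(line, pos):
--             pass
--         elif not line[:pos].endswith(tuple(ends)):
--             return False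
--         find_end = pos
--
--     return True
--
-- def is_in_comment_context_in_line_(line: str, pos: int) -> bool:
--     before = line[:pos]  # pos より先の文字列
--     # after = ""  # pos より後の文字列
--     # if len(line) > pos:
--     #     after = line[pos + 1 :]
--
--     find_begin = 0
--     while 1:
--         pos = before.find("//", find_begin)
--         if pos == -1:
--             break
--         else:
--             if is_in_string_context_(before, pos):
--                 find_begin = pos + 1
--                 continue
--             else:
--                 return True
--
--     find_begin = 0
--     while 1:
--         pos = before.find("/*", find_begin)
--         if pos == -1:
--             break
--         else:
--             if is_in_string_context_(before, pos):
--                 find_begin = pos + 1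
--                 continue
--             else:
--                 return True
--         # TODO: 本当は "*/" も考慮に入れないとだめだが，一旦なしで
--
--     return False
--
-- def is_in_string_context_(line: str, pos: int) -> bool:
--     before = line[:pos]  # pos より先の文字列
--
--     num_of_quotation = before.count('"') - before.count('\\"')
--     if num_of_quotation % 2 == 1:
--         return True
--
--     num_of_quotation = before.count("'") - before.count("\\'")
--     if num_of_quotation % 2 == 1:
--         return True
--
--     return False
-- ===== SOURCE B (Python) =====
-- def has_ended_with_list_before_target_(line: str, target: str, ends: list) -> bool:
--     n = len(line)
--     tl = len(target)
--     # One left-to-right pass: for every prefix length p, instr[p] says whether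
--     # line[:p] leaves an open quote (A's parity rule) and comment[p] whether
--     # line[:p] contains an unquoted '//' or '/*'.
--     instr = [False] * (n + 1)
--     comment = [False] * (n + 1)
--     dq = sq = False
--     for p in range(1, n + 1):
--         c = line[p - 1]
--         esc = p >= 2 and line[p - 2] == '\\'
--         if c == '"' and not esc:
--             dq = not dq
--         elif c == "'" and not esc:
--             sq = not sq
--         instr[p] = dq or sq
--         comment[p] = comment[p - 1] or (
--             p >= 2 and line[p - 2] == '/' and c in '/*' and not instr[p - 2]
--         )
--     # Walk the occurrences of target right to left, never overlapping a
--     # previously inspected one; contexts are answered from the tables.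
--     bound = n
--     for s in range(n - tl, -1, -1):
--         if s + tl <= bound and line[s:s + tl] == target:
--             if s == 0:
--                 return True
--             if not instr[s] and not comment[s] and not any(
--                 line[:s].endswith(e) for e in ends
--             ):
--                 return False
--             bound = s
--     return True
-- ===== Notes on version B (the rewrite author's own statement) =====
-- stated objective: alternative
-- what changed: Replaces A's repeated rfind loop with per-occurrence full-prefix rescans (count/find inside two helpers) by one left-to-right pass that tabulates quote-parity and unquoted-comment flags for every prefix, then a single right-to-left scan over occurrence positions answering each context check by table lookup.
-- outside the precondition, e.g. on has_ended_with_list_before_target_('a', '', []): A returns False, B returns False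
import Mathlib
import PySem

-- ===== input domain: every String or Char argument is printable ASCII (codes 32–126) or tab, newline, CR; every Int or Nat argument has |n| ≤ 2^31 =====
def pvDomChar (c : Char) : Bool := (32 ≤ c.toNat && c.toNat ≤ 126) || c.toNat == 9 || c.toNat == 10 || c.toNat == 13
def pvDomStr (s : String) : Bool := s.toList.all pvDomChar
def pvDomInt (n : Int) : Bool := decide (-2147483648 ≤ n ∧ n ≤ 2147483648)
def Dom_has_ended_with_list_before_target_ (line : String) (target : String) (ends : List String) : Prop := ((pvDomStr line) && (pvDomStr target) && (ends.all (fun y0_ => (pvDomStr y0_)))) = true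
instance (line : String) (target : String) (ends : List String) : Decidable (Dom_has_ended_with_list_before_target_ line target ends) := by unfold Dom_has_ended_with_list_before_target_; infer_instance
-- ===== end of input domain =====

-- B replaces A's repeated rfind + per-occurrence full-prefix rescans by one
-- left-to-right pass tabulating the context flags, then one right-to-left walk
-- over occurrence positions (objective: alternative).

-- ===== PORT A =====
-- is_in_string_context_(line, pos)
def is_in_string_context_ (line : List Char) (pos : Int) : Bool :=
  let before := PySem.List.slice line none (some pos)
  if PySem.Int.mod ((PySem.Chars.count before ['"'] : Int) - (PySem.Chars.count before ['\\', '"'] : Int)) 2 == 1 then true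
  else if PySem.Int.mod ((PySem.Chars.count before ['\''] : Int) - (PySem.Chars.count before ['\\', '\''] : Int)) 2 == 1 then true
  else false

-- one 'while 1' find-loop of is_in_comment_context_in_line_ (fuel makes the
-- recursion structural; find_begin strictly grows, so fuel len+2 is never hit)
def commentFindLoop (before pat : List Char) : Nat → Int → Bool
  | 0, _ => false
  | fuel + 1, findBegin =>
    let pos := PySem.Chars.findFrom before pat findBegin none
    if pos == -1 then false
    else if is_in_string_context_ before pos then commentFindLoop before pat fuel (pos + 1)
    else true

-- is_in_comment_context_in_line_(line, pos)
def is_in_comment_context_in_line_ (line : List Char) (pos : Int) : Bool :=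
  let before := PySem.List.slice line none (some pos)
  if commentFindLoop before ['/', '/'] (before.length + 2) 0 then true
  else commentFindLoop before ['/', '*'] (before.length + 2) 0

-- the main 'while 1' loop; find_end strictly decreases while target ≠ "", so
-- fuel len+2 is never exhausted on Pre_ inputs (Python loops forever otherwise)
def mainLoopA (line target : List Char) (ends : List String) : Nat → Int → Bool
  | 0, _ => true
  | fuel + 1, findEnd =>
    let pos := PySem.Chars.rfindFrom line target 0 (some findEnd)
    if pos == -1 then true
    else if pos == 0 then true
    else if is_in_string_context_ line pos then mainLoopA line target ends fuel pos
    else if is_in_comment_context_in_line_ line pos then mainLoopA line target ends fuel pos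
    else if !(ends.any (fun e => PySem.Chars.endswith (PySem.List.slice line none (some pos)) e.toList)) then false
    else mainLoopA line target ends fuel pos

def has_ended_with_list_before_target_ (line : String) (target : String) (ends : List String) : Bool :=
  mainLoopA line.toList target.toList ends (line.toList.length + 2) (line.toList.length : Int)

-- ===== PORT B =====
-- the single left-to-right pass of Source B: entry p (0-based, for prefix length
-- done+p+1) carries (instr, comment); state: prev char, instr two steps back,
-- the two quote parities, and the running comment flag
def flagsB : List Char → Option Char → Bool → Bool → Bool → Bool → List (Bool × Bool)
  | [], _, _, _, _, _ => []
  | c :: rest, prev, instrPP, dq, sq, com =>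
    let esc := prev == some '\\'
    let dq' := if c == '"' && !esc then !dq else dq
    let sq' := if c == '\'' && !esc then !sq else sq
    let com' := com || ((prev == some '/') && (c == '/' || c == '*') && !instrPP)
    (dq' || sq', com') :: flagsB rest (some c) (dq || sq) dq' sq' com'

-- the right-to-left walk of Source B over s = n-tl, …, 0 with the no-overlap bound
def chainB (line target : List Char) (ends : List String) (flags : List (Bool × Bool)) : List Int → Int → Bool
  | [], _ => true
  | s :: rest, bound =>
    if decide (s + (target.length : Int) ≤ bound) && (PySem.List.slice line (some s) (some (s + (target.length : Int))) == target) then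
      if s == 0 then true
      else
        let f := PySem.List.pyGetD flags s (false, false)
        if !f.1 && !f.2 && !(ends.any (fun e => PySem.Chars.endswith (PySem.List.slice line none (some s)) e.toList)) then false
        else chainB line target ends flags rest s
    else chainB line target ends flags rest bound

def has_ended_with_list_before_target__alt (line : String) (target : String) (ends : List String) : Bool :=
  let L := line.toList
  let flags := (false, false) :: flagsB L none false false false false
  chainB L target.toList ends flags
    (PySem.List.pyRange ((L.length : Int) - (target.toList.length : Int)) (-1) (-1)) (L.length : Int)

-- ===== PRECONDITION & SPEC =====
-- Pre_ excludes only target = "": there Python A's rfind loop never advances,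
-- so A diverges on most empty-target inputs (and the few values it does return
-- are artefacts of that stuck loop).
def Pre_has_ended_with_list_before_target_ (line : String) (target : String) (ends : List String) : Prop := target ≠ ""
instance (line : String) (target : String) (ends : List String) : Decidable (Pre_has_ended_with_list_before_target_ line target ends) := by unfold Pre_has_ended_with_list_before_target_; infer_instance
def pvWitness_has_ended_with_list_before_target_ : String × String × List String := ("x = 1; // \"a\"", "=", ["x "])

def Spec_has_ended_with_list_before_target_ (line : String) (target : String) (ends : List String) (out : Bool) : Prop := out = has_ended_with_list_before_target__alt line target ends
instance (line : String) (target : String) (ends : List String) (out : Bool) : Decidable (Spec_has_ended_with_list_before_target_ line target ends out) := by unfold Spec_has_ended_with_list_before_target_; infer_instance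

-- ===== CLAIM (what is proved, stated in full; the proofs are below) =====
def Claim_equal_has_ended_with_list_before_target_ : Prop := ∀ (line : String) (target : String) (ends : List String), Dom_has_ended_with_list_before_target_ line target ends → Pre_has_ended_with_list_before_target_ line target ends → Spec_has_ended_with_list_before_target_ line target ends (has_ended_with_list_before_target_ line target ends)


-- ===== LEMMAS AND PROOFS =====

-- the quote-parity state machine both programs realise: (dq, sq) after a list
-- of chars, `prev` the char just before it (for the backslash test)
def qstate : List Char → Option Char → Bool × Bool → Bool × Bool
  | [], _, st => st
  | c :: rest, prev, st =>
    let esc := prev == some '\\'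
    qstate rest (some c)
      (if c == '"' && !esc then !st.1 else st.1, if c == '\'' && !esc then !st.2 else st.2)

-- specification of the two context flags for prefix length p
def instrS (L : List Char) (p : Nat) : Bool :=
  (qstate (L.take p) none (false, false)).1 || (qstate (L.take p) none (false, false)).2

def comS (L : List Char) (p : Nat) : Bool :=
  decide (∃ i < p, i + 2 ≤ p ∧ L[i]? = some '/' ∧ (L[i+1]? = some '/' ∨ L[i+1]? = some '*') ∧ instrS L i = false)

-- what Python's count of a two-char pattern [a,b] computes (greedy scan)
def esc2 (a b : Char) : List Char → Nat
  | [] => 0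
  | [_] => 0
  | x :: y :: t => if x = a ∧ y = b then 1 + esc2 a b t else esc2 a b (y :: t)

lemma count_go_nil (sub : List Char) (fuel acc : Nat) : PySem.Chars.count.go sub fuel [] acc = acc := by
  cases fuel <;> simp [PySem.Chars.count.go]

lemma count_go_singleton (c : Char) : ∀ (fuel : Nat) (l : List Char) (acc : Nat), l.length ≤ fuel →
    PySem.Chars.count.go [c] fuel l acc = acc + l.count c := by
  intro fuel
  induction fuel with
  | zero =>
    intro l acc h
    have : l = [] := List.length_eq_zero_iff.mp (Nat.le_zero.mp h)
    subst this; simp [PySem.Chars.count.go]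
  | succ fuel ih =>
    intro l acc h
    cases l with
    | nil => simp [PySem.Chars.count.go]
    | cons x t =>
      simp only [PySem.Chars.count.go]
      by_cases hx : x = c
      · subst hx
        have hp : [x].isPrefixOf (x :: t) = true := by simp [List.isPrefixOf]
        simp only [hp]
        rw [show List.drop [x].length (x :: t) = t by simp]
        rw [ih t (acc + 1) (by simpa using Nat.lt_succ_iff.mp (by simpa using h))]
        simp; omega
      · have hp : [c].isPrefixOf (x :: t) = false := by simp [List.isPrefixOf, Ne.symm hx]
        simp only [hp]
        rw [ih t acc (by simpa using Nat.lt_succ_iff.mp (by simpa using h))]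
        simp [hx]

lemma count_singleton (l : List Char) (c : Char) : PySem.Chars.count l [c] = l.count c := by
  rw [show PySem.Chars.count l [c] = PySem.Chars.count.go [c] l.length l 0 by simp [PySem.Chars.count]]
  simpa using count_go_singleton c l.length l 0 le_rfl

lemma count_go_pair (a b : Char) (hab : a ≠ b) : ∀ (fuel : Nat) (l : List Char) (acc : Nat), l.length ≤ fuel →
    PySem.Chars.count.go [a, b] fuel l acc = acc + esc2 a b l := by
  intro fuel
  induction fuel using Nat.strong_induction_on with
  | _ fuel ih =>
    intro l acc h
    match fuel, l with
    | fuel, [] => simp [count_go_nil, esc2]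
    | 0, l =>
      have hl : l = [] := List.length_eq_zero_iff.mp (Nat.le_zero.mp h)
      subst hl; simp [count_go_nil, esc2]
    | fuel + 1, [x] =>
      simp only [PySem.Chars.count.go]
      have hp : [a, b].isPrefixOf [x] = false := by
        cases hh : [a, b].isPrefixOf [x]
        · rfl
        · exfalso; have := List.IsPrefix.length_le (List.isPrefixOf_iff_prefix.mp hh); simp at this
      simp [hp, count_go_nil, esc2]
    | fuel + 1, x :: y :: t =>
      simp only [PySem.Chars.count.go]
      by_cases hxy : x = a ∧ y = b
      · have hp : [a, b].isPrefixOf (x :: y :: t) = true := by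
          simp [List.isPrefixOf, hxy.1, hxy.2]
        simp only [hp, if_true]
        rw [show List.drop [a, b].length (x :: y :: t) = t by simp]
        rw [ih fuel (Nat.lt_succ_self _) t (acc + 1) (by simp at h; omega)]
        simp [esc2, hxy]; omega
      · have hp : [a, b].isPrefixOf (x :: y :: t) = false := by
          cases hh : [a, b].isPrefixOf (x :: y :: t)
          · rfl
          · exfalso
            rcases List.isPrefixOf_iff_prefix.mp hh with ⟨r, hr⟩
            simp at hr
            exact hxy ⟨hr.1.symm, hr.2.1.symm⟩
        simp only [hp]
        rw [ih fuel (Nat.lt_succ_self _) (y :: t) acc (by simp at h ⊢; omega)]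
        simp [esc2, hxy]

lemma count_pair (l : List Char) (a b : Char) (hab : a ≠ b) :
    PySem.Chars.count l [a, b] = esc2 a b l := by
  rw [show PySem.Chars.count l [a, b] = PySem.Chars.count.go [a, b] l.length l 0 by simp [PySem.Chars.count]]
  simpa using count_go_pair a b hab l.length l 0 le_rfl

lemma esc2_snoc (a b : Char) (hab : a ≠ b) : ∀ (l : List Char) (c : Char),
    esc2 a b (l ++ [c]) = esc2 a b l + (if l.getLast? = some a ∧ c = b then 1 else 0) := by
  intro l
  induction l using esc2.induct a b with
  | case1 => intro c; simp [esc2]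
  | case2 x => intro c; simp only [List.cons_append, List.nil_append]
               by_cases hx : x = a ∧ c = b <;> simp [esc2, hx]
  | case3 x y t hxy ih =>
    intro c
    simp only [List.cons_append]
    rw [show esc2 a b (x :: y :: (t ++ [c])) = 1 + esc2 a b (t ++ [c]) by simp [esc2, hxy]]
    rw [ih c]
    rw [show esc2 a b (x :: y :: t) = 1 + esc2 a b t by simp [esc2, hxy]]
    cases t with
    | nil =>
      have hy : ¬(some y = some a ∧ c = b) := by
        rintro ⟨hy, -⟩
        exact hab (by rw [← hxy.2]; exact (Option.some_inj.mp hy).symm)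
      simp only [List.getLast?_cons_cons, List.getLast?_singleton, List.getLast?_nil]
      rw [if_neg hy, if_neg (by rintro ⟨h1, -⟩; cases h1)]; omega
    | cons z t' =>
      have : (x :: y :: z :: t').getLast? = (z :: t').getLast? := by
        simp [List.getLast?_cons_cons]
      rw [this]
      omega
  | case4 x y t hxy ih =>
    intro c
    simp only [List.cons_append]
    rw [show esc2 a b (x :: y :: (t ++ [c])) = esc2 a b ((y :: t) ++ [c]) by simp [esc2, hxy]]
    rw [ih c]
    rw [show esc2 a b (x :: y :: t) = esc2 a b (y :: t) by simp [esc2, hxy]]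
    rw [show (x :: y :: t).getLast? = (y :: t).getLast? from List.getLast?_cons_cons]

lemma qstate_snoc : ∀ (l : List Char) (prev : Option Char) (st : Bool × Bool) (c : Char),
    qstate (l ++ [c]) prev st =
      (let st' := qstate l prev st
       let esc := (l.getLast?.or prev) == some '\\'
       (if c == '"' && !esc then !st'.1 else st'.1, if c == '\'' && !esc then !st'.2 else st'.2)) := by
  intro l
  induction l with
  | nil => intro prev st c; simp [qstate]
  | cons x t ih =>
    intro prev st c
    simp only [List.cons_append, qstate]
    rw [ih]
    cases t with
    | nil => simp
    | cons z t' =>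
      rcases hys : (z :: t').getLast? with _ | y
      · simp at hys
      · simp [List.getLast?_cons_cons, hys]

lemma mod2_succ (x : Int) : (PySem.Int.mod (x + 1) 2 == 1) = !(PySem.Int.mod x 2 == 1) := by
  rw [PySem.Int.mod_eq_emod_of_pos (by norm_num), PySem.Int.mod_eq_emod_of_pos (by norm_num)]
  rcases Int.emod_two_eq x with h | h <;>
    · have h2 : (x + 1) % 2 = (x % 2 + 1) % 2 := by omega
      simp [h2, h]

lemma par_comp (q e : Nat) (b : Bool) (cm lb : Prop) [Decidable cm] [Decidable lb]
    (h : (PySem.Int.mod ((q : Int) - e) 2 == 1) = b) :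
    (PySem.Int.mod ((↑(q + (if cm then 1 else 0)) : Int) - ↑(e + (if lb ∧ cm then 1 else 0))) 2 == 1)
      = if (decide cm && !decide lb) = true then !b else b := by
  by_cases hcm : cm
  · by_cases hlb : lb
    · simp only [hcm, hlb, if_pos, and_self, decide_true, Bool.not_true, Bool.and_false,
        Bool.false_eq_true, if_false]
      rw [show ((↑(q + 1) : Int) - ↑(e + 1)) = (q : Int) - e by push_cast; ring]
      exact h
    · rw [if_pos hcm, if_neg (by rintro ⟨h1, -⟩; exact hlb h1)]
      simp only [hcm, hlb, decide_true, decide_false, Bool.not_false, Bool.and_true, if_true]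
      push_cast
      rw [show ((q : Int) + 1 - ((e : Int) + 0)) = ((q : Int) - e) + 1 by ring, mod2_succ, h]
  · rw [if_neg hcm, if_neg (by rintro ⟨-, h2⟩; exact hcm h2)]
    simp only [hcm, decide_false, Bool.false_and, Bool.false_eq_true, if_false]
    simpa using h

lemma strA_core : ∀ l : List Char,
    ((PySem.Int.mod ((PySem.Chars.count l ['"'] : Int) - (PySem.Chars.count l ['\\', '"'] : Int)) 2 == 1)
        = (qstate l none (false, false)).1)
    ∧ ((PySem.Int.mod ((PySem.Chars.count l ['\''] : Int) - (PySem.Chars.count l ['\\', '\''] : Int)) 2 == 1)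
        = (qstate l none (false, false)).2) := by
  intro l
  induction l using List.reverseRecOn with
  | nil => exact ⟨by decide, by decide⟩
  | append_singleton l c ih =>
    obtain ⟨ih1, ih2⟩ := ih
    rw [qstate_snoc]
    simp only [count_singleton, count_pair _ '\\' '"' (by decide), count_pair _ '\\' '\'' (by decide)] at ih1 ih2 ⊢
    rw [esc2_snoc '\\' '"' (by decide), esc2_snoc '\\' '\'' (by decide), List.count_append, List.count_append]
    simp only [Option.or_none]
    have hb1 : (c == '"') = decide (c = '"') := by rw [Bool.eq_iff_iff]; simp
    have hb2 : (c == '\'') = decide (c = '\'') := by rw [Bool.eq_iff_iff]; simp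
    have hb3 : (l.getLast? == some '\\') = decide (l.getLast? = some '\\') := by rw [Bool.eq_iff_iff]; simp
    have hc1 : List.count '"' [c] = if c = '"' then 1 else 0 := by by_cases h : c = '"' <;> simp [h]
    have hc2 : List.count '\'' [c] = if c = '\'' then 1 else 0 := by by_cases h : c = '\'' <;> simp [h]
    rw [hb1, hb2, hb3, hc1, hc2]
    exact ⟨par_comp _ _ _ _ _ ih1, par_comp _ _ _ _ _ ih2⟩

lemma strA (L : List Char) (p : Nat) : is_in_string_context_ L (p : Int) = instrS L p := by
  unfold is_in_string_context_ instrS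
  dsimp only
  rw [PySem.List.slice_to_natCast]
  obtain ⟨h1, h2⟩ := strA_core (L.take p)
  rw [h1, h2]
  cases (qstate (L.take p) none (false, false)).1 <;> cases (qstate (L.take p) none (false, false)).2 <;> simp

lemma strA_take (L : List Char) (p i : Nat) (h : i ≤ p) :
    is_in_string_context_ (L.take p) (i : Int) = instrS L i := by
  rw [strA (L.take p) i]
  unfold instrS
  rw [List.take_take, min_eq_left h]

lemma prefix_pair_iff (a b : Char) (L : List Char) (i : Nat) :
    [a, b] <+: L.drop i ↔ (L[i]? = some a ∧ L[i + 1]? = some b) := by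
  have h0 : (L.drop i)[0]? = L[i]? := by simp [List.getElem?_drop]
  have h1 : (L.drop i)[1]? = L[i + 1]? := by rw [List.getElem?_drop]
  rw [← h0, ← h1]
  cases hm : L.drop i with
  | nil => simp
  | cons x t =>
    cases t with
    | nil => simp [List.cons_prefix_cons]
    | cons y t' => simp [List.cons_prefix_cons, eq_comm]

lemma prefix_take_drop (T L : List Char) (hT : T ≠ []) (b j : Nat) :
    T <+: (L.take b).drop j ↔ (j + T.length ≤ b ∧ T <+: L.drop j) := by
  have hT1 : 1 ≤ T.length := List.length_pos_iff.mpr hT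
  rw [List.drop_take, List.prefix_take_iff]
  constructor
  · rintro ⟨h1, h2⟩; exact ⟨by omega, h1⟩
  · rintro ⟨h1, h2⟩; exact ⟨h2, by omega⟩

lemma commentLoop_iff (before pat : List Char) (hpat : pat ≠ []) :
    ∀ (fuel fb : Nat), before.length + 1 - fb ≤ fuel → fb ≤ before.length →
    (commentFindLoop before pat fuel (fb : Int) = true ↔
      ∃ i : Nat, fb ≤ i ∧ pat <+: before.drop i ∧ is_in_string_context_ before (i : Int) = false) := by
  intro fuel
  induction fuel with
  | zero => intro fb h1 h2; omega
  | succ fuel ih =>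
    intro fb h1 h2
    simp only [commentFindLoop]
    by_cases hpos : PySem.Chars.findFrom before pat (fb : Int) = -1
    · rw [if_pos (by simp [hpos])]
      simp only [Bool.false_eq_true, false_iff]
      rintro ⟨i, hfbi, hpre, -⟩
      have hinf : pat <:+: before.drop fb := by
        have hdd : (before.drop fb).drop (i - fb) = before.drop i := by
          rw [List.drop_drop]; congr 1; omega
        exact ((hdd ▸ hpre).isInfix).trans (List.drop_suffix _ _).isInfix
      exact ((PySem.Chars.findFrom_natCast_eq_neg_one_iff before pat fb h2).mp hpos) hinf
    · obtain ⟨hge, hpre, hmin⟩ := PySem.Chars.findFrom_natCast_spec before pat fb h2 hpos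
      set q := (PySem.Chars.findFrom before pat (fb : Int)).toNat with hq
      have hqcast : PySem.Chars.findFrom before pat (fb : Int) = (q : Int) := by
        rw [hq]; omega
      have hfbq : fb ≤ q := by omega
      have hqlen : q + pat.length ≤ before.length := by
        have := hpre.length_le
        rw [List.length_drop] at this
        have hplen : 1 ≤ pat.length := List.length_pos_iff.mpr hpat
        omega
      have hplen : 1 ≤ pat.length := List.length_pos_iff.mpr hpat
      rw [hqcast]
      rw [if_neg (by simp only [beq_iff_eq]; omega)]
      by_cases hstr : is_in_string_context_ before (q : Int) = true
      · rw [if_pos hstr]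
        rw [show ((q : Int) + 1) = ((q + 1 : Nat) : Int) by push_cast; ring]
        rw [ih (q + 1) (by omega) (by omega)]
        constructor
        · rintro ⟨i, hi1, hi2, hi3⟩; exact ⟨i, by omega, hi2, hi3⟩
        · rintro ⟨i, hi1, hi2, hi3⟩
          refine ⟨i, ?_, hi2, hi3⟩
          by_cases hiq : i < q
          · exact absurd hi2 (hmin i hi1 hiq)
          · have : i ≠ q := fun h => by rw [h] at hi3; rw [hi3] at hstr; simp at hstr
            omega
      · rw [if_neg hstr]
        simp only [true_iff]
        exact ⟨q, hfbq, hpre, Bool.not_eq_true _ ▸ (by simpa using hstr)⟩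

lemma comA (L : List Char) (p : Nat) (hp : p ≤ L.length) :
    is_in_comment_context_in_line_ L (p : Int) = comS L p := by
  unfold is_in_comment_context_in_line_
  dsimp only
  rw [PySem.List.slice_to_natCast]
  have hlen : (L.take p).length = p := by simp [hp]
  have h1 := commentLoop_iff (L.take p) ['/', '/'] (by simp) ((L.take p).length + 2) 0 (by omega) (by omega)
  have h2 := commentLoop_iff (L.take p) ['/', '*'] (by simp) ((L.take p).length + 2) 0 (by omega) (by omega)
  rw [Nat.cast_zero] at h1 h2
  rw [Bool.eq_iff_iff]
  constructor
  · intro h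
    have key : ∃ (c : Char), (c = '/' ∨ c = '*') ∧
        ∃ i : Nat, ['/', c] <+: (L.take p).drop i ∧ is_in_string_context_ (L.take p) (i : Int) = false := by
      by_cases hb1 : commentFindLoop (L.take p) ['/', '/'] ((L.take p).length + 2) 0 = true
      · obtain ⟨i, -, hpre, hstr⟩ := h1.mp hb1
        exact ⟨'/', Or.inl rfl, i, hpre, hstr⟩
      · rw [if_neg hb1] at h
        obtain ⟨i, -, hpre, hstr⟩ := h2.mp h
        exact ⟨'*', Or.inr rfl, i, hpre, hstr⟩
    obtain ⟨c, hc, i, hpre, hstr⟩ := key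
    have hpt := (prefix_take_drop _ L (by simp) p i).mp hpre
    have hpair := (prefix_pair_iff '/' c L i).mp hpt.2
    have hi2 : i + 2 ≤ p := by simpa using hpt.1
    rw [strA_take L p i (by omega)] at hstr
    simp only [comS, decide_eq_true_eq]
    refine ⟨i, by omega, hi2, hpair.1, ?_, hstr⟩
    rcases hc with h | h <;> [exact Or.inl (h ▸ hpair.2); exact Or.inr (h ▸ hpair.2)]
  · intro h
    simp only [comS, decide_eq_true_eq] at h
    obtain ⟨i, hip, hi2, hci, hci1, hstr⟩ := h
    have hstr' : is_in_string_context_ (L.take p) (i : Int) = false := by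
      rw [strA_take L p i (by omega)]; exact hstr
    rcases hci1 with hc | hc
    · have : commentFindLoop (L.take p) ['/', '/'] ((L.take p).length + 2) 0 = true := by
        rw [h1]
        exact ⟨i, Nat.zero_le i, (prefix_take_drop _ L (by simp) p i).mpr
          ⟨by simpa using hi2, (prefix_pair_iff '/' '/' L i).mpr ⟨hci, hc⟩⟩, hstr'⟩
      rw [if_pos this]
    · by_cases hb1 : commentFindLoop (L.take p) ['/', '/'] ((L.take p).length + 2) 0 = true
      · rw [if_pos hb1]
      · rw [if_neg hb1]
        rw [h2]
        exact ⟨i, Nat.zero_le i, (prefix_take_drop _ L (by simp) p i).mpr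
          ⟨by simpa using hi2, (prefix_pair_iff '/' '*' L i).mpr ⟨hci, hc⟩⟩, hstr'⟩

lemma instrS_zero (L : List Char) : instrS L 0 = false := by
  simp [instrS, qstate]

lemma comS_zero (L : List Char) : comS L 0 = false := by
  simp [comS]

lemma comS_succ (L : List Char) (p : Nat) :
    comS L (p + 1) = (comS L p ||
      (decide (1 ≤ p) && (L[p - 1]? == some '/') && ((L[p]? == some '/') || (L[p]? == some '*')) && !instrS L (p - 1))) := by
  rw [Bool.eq_iff_iff]
  simp only [comS, Bool.or_eq_true, Bool.and_eq_true, decide_eq_true_eq, beq_iff_eq,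
    Bool.not_eq_true']
  constructor
  · rintro ⟨i, hip, h2, hc1, hc2, hc3⟩
    by_cases hcase : i + 2 ≤ p
    · exact Or.inl ⟨i, by omega, hcase, hc1, hc2, hc3⟩
    · have hi : i = p - 1 := by omega
      have hp1 : 1 ≤ p := by omega
      have hi1 : i + 1 = p := by omega
      subst hi
      exact Or.inr ⟨⟨⟨hp1, hc1⟩, by rw [← hi1]; exact hc2⟩, hc3⟩
  · rintro (⟨i, hip, h2, hP⟩ | ⟨⟨⟨hp1, hc1⟩, hc2⟩, hc3⟩)
    · exact ⟨i, by omega, by omega, hP⟩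
    · exact ⟨p - 1, by omega, by omega, hc1, by rw [show p - 1 + 1 = p by omega]; exact hc2, hc3⟩

lemma flagsB_get : ∀ (rest done L : List Char), L = done ++ rest → ∀ j, j < rest.length →
    (flagsB rest done.getLast? (instrS L (done.length - 1))
        (qstate (L.take done.length) none (false, false)).1
        (qstate (L.take done.length) none (false, false)).2
        (comS L done.length))[j]? =
      some (instrS L (done.length + j + 1), comS L (done.length + j + 1)) := by
  intro rest
  induction rest with
  | nil => intro done L hL j hj; simp at hj
  | cons c rest' ih =>
    intro done L hL j hj
    have hTake : L.take done.length = done := by rw [hL]; exact List.take_left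
    have hTake1 : L.take (done.length + 1) = done ++ [c] := by
      rw [hL, show done ++ c :: rest' = (done ++ [c]) ++ rest' by simp]
      rw [show done.length + 1 = (done ++ [c]).length + 0 by simp]
      rw [List.take_append]
      simp
    have hInstr1 : instrS L (done.length + 1)
        = ((if c == '"' && !(done.getLast? == some '\\') then !(qstate done none (false, false)).1 else (qstate done none (false, false)).1)
          || (if c == '\'' && !(done.getLast? == some '\\') then !(qstate done none (false, false)).2 else (qstate done none (false, false)).2)) := by
      unfold instrS
      rw [hTake1, qstate_snoc]
      simp
    have hGetd : L[done.length]? = some c := by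
      rw [hL]
      rw [List.getElem?_append_right (le_refl done.length)]
      simp
    have hPrevSlash : (decide (1 ≤ done.length) && (L[done.length - 1]? == some '/')) = (done.getLast? == some '/') := by
      cases done with
      | nil => simp
      | cons x t =>
        have h1 : (1 ≤ (x :: t).length) := by simp
        rw [decide_eq_true h1, Bool.true_and]
        rw [hL, List.getElem?_append_left (by simp)]
        rw [List.getLast?_eq_getElem?]
    have hCom1 : comS L (done.length + 1)
        = (comS L done.length ||
            ((done.getLast? == some '/') && ((c == '/') || (c == '*')) && !instrS L (done.length - 1))) := by
      rw [comS_succ]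
      rw [show (decide (1 ≤ done.length) && (L[done.length - 1]? == some '/') &&
            ((L[done.length]? == some '/') || (L[done.length]? == some '*')) && !instrS L (done.length - 1))
          = ((done.getLast? == some '/') && ((c == '/') || (c == '*')) && !instrS L (done.length - 1)) by
        rw [← hPrevSlash, hGetd]
        simp]
    cases j with
    | zero =>
      simp only [flagsB, List.getElem?_cons_zero, Option.some_inj]
      rw [hTake]
      refine Prod.ext ?_ ?_
      · rw [show done.length + 0 + 1 = done.length + 1 by omega, hInstr1]
      · rw [show done.length + 0 + 1 = done.length + 1 by omega, hCom1]
    | succ j' =>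
      simp only [flagsB, List.getElem?_cons_succ]
      rw [hTake]
      have hL' : L = (done ++ [c]) ++ rest' := by simp [hL]
      have hrec := ih (done ++ [c]) L hL' j' (by simp at hj ⊢; omega)
      rw [List.getLast?_concat] at hrec
      rw [show (done ++ [c]).length = done.length + 1 by simp] at hrec
      rw [show done.length + 1 - 1 = done.length by omega] at hrec
      rw [hTake1] at hrec
      rw [qstate_snoc] at hrec
      simp only [Option.or_none] at hrec
      rw [hCom1] at hrec
      rw [show instrS L done.length = ((qstate done none (false, false)).1 || (qstate done none (false, false)).2) by
        unfold instrS; rw [hTake]] at hrec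
      rw [show done.length + (j' + 1) + 1 = done.length + 1 + j' + 1 by omega]
      exact hrec

lemma flags_getD (L : List Char) (p : Nat) (hp : p ≤ L.length) :
    PySem.List.pyGetD ((false, false) :: flagsB L none false false false false) (p : Int) (false, false)
      = (instrS L p, comS L p) := by
  rw [PySem.List.pyGetD_natCast]
  cases p with
  | zero => simp [instrS_zero, comS_zero]
  | succ j =>
    have h := flagsB_get L [] L (by simp) j (by omega)
    simp only [List.getLast?_nil, List.length_nil, List.take_zero, Nat.zero_sub, Nat.zero_add] at h
    rw [instrS_zero] at h
    rw [comS_zero] at h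
    rw [show qstate [] none (false, false) = (false, false) from rfl] at h
    rw [List.getD_cons_succ, List.getD_eq_getElem?_getD, h]
    rfl

lemma rfind_go_neg_one (s sub : List Char) : ∀ (k : Nat), (∀ j ≤ k, ¬ sub <+: s.drop j) →
    PySem.Chars.rfind.go s sub k = -1 := by
  intro k
  induction k with
  | zero =>
    intro h
    have := h 0 le_rfl
    simp only [List.drop_zero] at this
    simp only [PySem.Chars.rfind.go]
    rw [if_neg (by rw [List.isPrefixOf_iff_prefix]; exact this)]
  | succ k ih =>
    intro h
    simp only [PySem.Chars.rfind.go]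
    rw [if_neg (by rw [List.isPrefixOf_iff_prefix]; exact h (k + 1) le_rfl)]
    exact ih (fun j hj => h j (by omega))

lemma rfind_go_eq (s sub : List Char) : ∀ (k p : Nat), p ≤ k → sub <+: s.drop p →
    (∀ j ≤ k, sub <+: s.drop j → p ≤ j → j = p) →
    PySem.Chars.rfind.go s sub k = (p : Int) := by
  intro k
  induction k with
  | zero =>
    intro p hp h2 h3
    have : p = 0 := Nat.le_zero.mp hp
    subst this
    simp only [PySem.Chars.rfind.go]
    rw [if_pos (by rw [List.isPrefixOf_iff_prefix]; simpa using h2)]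
    simp
  | succ k ih =>
    intro p hp h2 h3
    simp only [PySem.Chars.rfind.go]
    by_cases hk : sub <+: s.drop (k + 1)
    · rw [if_pos (by rw [List.isPrefixOf_iff_prefix]; exact hk)]
      by_cases hpk : p = k + 1
      · subst hpk; rfl
      · exact absurd (h3 (k + 1) le_rfl hk (by omega)).symm hpk
    · rw [if_neg (by rw [List.isPrefixOf_iff_prefix]; exact hk)]
      have hpk : p ≠ k + 1 := fun h => hk (h ▸ h2)
      exact ih p (by omega) h2 (fun j hj hpre hple => h3 j (by omega) hpre hple)

lemma rfindFrom_none (L T : List Char) (hT : T ≠ []) (bound : Nat) (hb : bound ≤ L.length)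
    (h : ∀ j : Nat, ¬(j + T.length ≤ bound ∧ T <+: L.drop j)) :
    PySem.Chars.rfindFrom L T 0 (some (bound : Int)) = -1 := by
  have hlen : (L.take bound).length = bound := by simp [hb]
  have hr : PySem.Chars.rfind (L.take bound) T = -1 := by
    unfold PySem.Chars.rfind
    rw [hlen]
    exact rfind_go_neg_one _ _ bound (fun j hj hpre => h j ((prefix_take_drop T L hT bound j).mp hpre))
  unfold PySem.Chars.rfindFrom
  dsimp only
  rw [if_neg (show ¬((L.length : Int) < (bound : Int)) by omega)]
  rw [if_neg (show ¬((bound : Int) < 0) by omega)]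
  norm_num
  exact hr

lemma rfindFrom_eq (L T : List Char) (hT : T ≠ []) (bound : Nat) (hb : bound ≤ L.length) (p : Nat)
    (h1 : p + T.length ≤ bound) (h2 : T <+: L.drop p)
    (h3 : ∀ j : Nat, j + T.length ≤ bound → T <+: L.drop j → j ≤ p) :
    PySem.Chars.rfindFrom L T 0 (some (bound : Int)) = (p : Int) := by
  have hT1 : 1 ≤ T.length := List.length_pos_iff.mpr hT
  have hlen : (L.take bound).length = bound := by simp [hb]
  have hr : PySem.Chars.rfind (L.take bound) T = (p : Int) := by
    unfold PySem.Chars.rfind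
    rw [hlen]
    refine rfind_go_eq _ _ bound p (by omega) ((prefix_take_drop T L hT bound p).mpr ⟨h1, h2⟩) ?_
    intro j hj hpre hple
    have hj2 := (prefix_take_drop T L hT bound j).mp hpre
    have := h3 j hj2.1 hj2.2
    omega
  unfold PySem.Chars.rfindFrom
  dsimp only
  rw [if_neg (show ¬((L.length : Int) < (bound : Int)) by omega)]
  rw [if_neg (show ¬((bound : Int) < 0) by omega)]
  norm_num
  rw [hr]
  rw [if_neg (show ¬((p : Int) = -1) by omega), if_neg (show ¬((bound : Int) < 0) by omega)]

lemma slice_beq_iff (L T : List Char) (s : Nat) :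
    (PySem.List.slice L (some (s : Int)) (some ((s : Int) + (T.length : Int))) == T) = decide (T <+: L.drop s) := by
  rw [PySem.List.slice_natCast_add]
  rw [Bool.eq_iff_iff]
  simp only [beq_iff_eq, decide_eq_true_eq]
  rw [List.prefix_iff_eq_take]
  exact eq_comm

lemma chain_skip (L T : List Char) (ends : List String) (flags : List (Bool × Bool)) (bound : Int) :
    ∀ (k : Nat) (m p : Int), m = p + k → -1 ≤ p →
    (∀ s : Nat, p < (s : Int) → (s : Int) ≤ m → ¬((s : Int) + (T.length : Int) ≤ bound ∧ T <+: L.drop s)) →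
    chainB L T ends flags (PySem.List.pyRange m (-1) (-1)) bound
      = chainB L T ends flags (PySem.List.pyRange p (-1) (-1)) bound := by
  intro k
  induction k with
  | zero => intro m p hm hp h; rw [hm]; norm_num
  | succ k ih =>
    intro m p hm hp h
    have hm1 : -1 < m := by omega
    rw [PySem.List.pyRange_neg_one_cons (by omega : (-1 : Int) < m)]
    simp only [chainB]
    have hmnat : m = ((m.toNat : Nat) : Int) := by omega
    have hcond : (decide (m + (T.length : Int) ≤ bound) &&
        (PySem.List.slice L (some m) (some (m + (T.length : Int))) == T)) = false := by
      rw [hmnat, slice_beq_iff]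
      have := h m.toNat (by omega) (by omega)
      by_cases h1 : ((m.toNat : Nat) : Int) + (T.length : Int) ≤ bound
      · have h2 : ¬ T <+: L.drop m.toNat := fun hp2 => this ⟨h1, hp2⟩
        rw [decide_eq_true h1, Bool.true_and, decide_eq_false h2]
      · rw [decide_eq_false h1, Bool.false_and]
    rw [hcond]
    simp only [Bool.false_eq_true, if_false]
    exact ih (m - 1) p (by omega) hp (fun s h1 h2 => h s h1 (by omega))

lemma chainB_nil_true (L T : List Char) (ends : List String) (flags : List (Bool × Bool)) (b : Int) :
    chainB L T ends flags [] b = true := by simp [chainB]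

lemma chain_eq (L T : List Char) (ends : List String) (flags : List (Bool × Bool)) (hT : T ≠ [])
    (hflags : ∀ p : Nat, p ≤ L.length → PySem.List.pyGetD flags (p : Int) (false, false) = (instrS L p, comS L p)) :
    ∀ (fuel bound : Nat) (m : Int), bound ≤ L.length → bound ≤ fuel →
    (∀ j : Nat, j + T.length ≤ bound → T <+: L.drop j → (j : Int) ≤ m) →
    mainLoopA L T ends fuel (bound : Int)
      = chainB L T ends flags (PySem.List.pyRange m (-1) (-1)) (bound : Int) := by
  have hT1 : 1 ≤ T.length := List.length_pos_iff.mpr hT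
  have hRHStrue : ∀ (bound m : Int), (∀ j : Nat, ¬(j + T.length ≤ bound ∧ (T <+: L.drop j ∧ (j : Int) ≤ m))) →
      chainB L T ends flags (PySem.List.pyRange m (-1) (-1)) bound = true := by
    intro bound m hnone
    by_cases hm1 : -1 ≤ m
    · rw [chain_skip L T ends flags bound (m + 1).toNat m (-1) (by omega) (by omega) ?_]
      · rw [PySem.List.pyRange_neg_one_eq_nil (by omega)]
        exact chainB_nil_true _ _ _ _ _
      · intro s h1 h2
        rintro ⟨hfit, hpre⟩
        have hjle : ((s : Nat) : Int) + (T.length : Int) ≤ bound := hfit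
        exact hnone s ⟨by exact_mod_cast hjle, hpre, by omega⟩
    · rw [PySem.List.pyRange_neg_one_eq_nil (by omega)]
      exact chainB_nil_true _ _ _ _ _
  intro fuel
  induction fuel with
  | zero =>
    intro bound m hb hf hm
    have hb0 : bound = 0 := by omega
    subst hb0
    simp only [mainLoopA]
    rw [hRHStrue _ _ (fun j => by rintro ⟨hfit, -, -⟩; push_cast at hfit; omega)]
  | succ fuel ih =>
    intro bound m hb hf hm
    simp only [mainLoopA]
    by_cases hex : ∃ j : Nat, j + T.length ≤ bound ∧ T <+: L.drop j
    · obtain ⟨j0, hj0⟩ := hex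
      have hPp : j0 + T.length ≤ bound ∧ T <+: L.drop j0 := hj0
      set p := Nat.findGreatest (fun j => j + T.length ≤ bound ∧ T <+: L.drop j) bound with hpdef
      have hPgreat : p + T.length ≤ bound ∧ T <+: L.drop p := by
        have := Nat.findGreatest_spec (P := fun j => j + T.length ≤ bound ∧ T <+: L.drop j)
          (m := j0) (n := bound) (by omega) hPp
        rw [← hpdef] at this
        exact this
      have hmax : ∀ j : Nat, j + T.length ≤ bound → T <+: L.drop j → j ≤ p := by
        intro j h1 h2
        by_contra hgt
        push_neg at hgt
        have := Nat.findGreatest_is_greatest (P := fun j => j + T.length ≤ bound ∧ T <+: L.drop j)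
          (k := j) (n := bound) (by rw [← hpdef]; omega) (by omega)
        exact this ⟨h1, h2⟩
      rw [rfindFrom_eq L T hT bound hb p hPgreat.1 hPgreat.2 hmax]
      have hpm : (p : Int) ≤ m := hm p hPgreat.1 hPgreat.2
      rw [chain_skip L T ends flags (bound : Int) (m - p).toNat m (p : Int) (by omega) (by omega)
        (fun s h1 h2 => by
          rintro ⟨hfit, hpre⟩
          have : s ≤ p := hmax s (by exact_mod_cast hfit) hpre
          omega)]
      rw [PySem.List.pyRange_neg_one_cons (show (-1 : Int) < (p : Int) by omega)]
      simp only [chainB]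
      rw [slice_beq_iff L T p]
      rw [decide_eq_true (show (p : Int) + (T.length : Int) ≤ (bound : Int) by omega),
        Bool.true_and, decide_eq_true hPgreat.2]
      have hne1 : (((p : Int)) == -1) = false := by rw [beq_eq_false_iff_ne]; omega
      rw [hne1]
      by_cases hp0 : p = 0
      · have h0 : (((p : Int)) == 0) = true := by simp [hp0]
        rw [h0]
        simp
      · have hne0 : (((p : Int)) == 0) = false := by rw [beq_eq_false_iff_ne]; omega
        rw [hne0]
        simp only [Bool.false_eq_true, if_false, if_true]
        rw [strA L p, comA L p (by omega)]
        rw [hflags p (by omega)]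
        have hrec := ih p ((p : Int) - 1) (by omega) (by omega)
          (fun j h1 h2 => by
            have : j + T.length ≤ p := h1
            omega)
        cases hi : instrS L p <;> cases hc : comS L p <;>
          cases ha : ends.any (fun e => PySem.Chars.endswith (PySem.List.slice L none (some (p : Int))) e.toList) <;>
          simp only [Bool.not_true, Bool.not_false, Bool.false_and, Bool.and_false, Bool.true_and,
            Bool.and_true, Bool.true_eq_false, Bool.false_eq_true, if_false, if_true] <;>
          first
            | rfl
            | exact hrec
    · push_neg at hex
      rw [rfindFrom_none L T hT bound hb (fun j => by rintro ⟨h1, h2⟩; exact hex j h1 h2)]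
      rw [hRHStrue _ _ (fun j => by rintro ⟨hfit, hpre, -⟩; exact hex j (by exact_mod_cast hfit) hpre)]
      simp

-- ===== VERDICT (by name: the statement is the Claim_ definition above) =====
theorem has_ended_with_list_before_target__spec : Claim_equal_has_ended_with_list_before_target_ := by
  intro line target ends hDom hPre
  unfold Spec_has_ended_with_list_before_target_
  unfold has_ended_with_list_before_target_ has_ended_with_list_before_target__alt
  dsimp only
  have hT : target.toList ≠ [] := by
    intro h
    exact hPre (by rwa [← String.toList_eq_nil_iff])
  exact chain_eq line.toList target.toList ends
    ((false, false) :: flagsB line.toList none false false false false) hT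
    (fun p hp => flags_getD line.toList p hp)
    (line.toList.length + 2) line.toList.length
    ((line.toList.length : Int) - (target.toList.length : Int))
    le_rfl (by omega)
    (fun j h1 h2 => by
      have := List.length_pos_iff.mpr hT
      omega)
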